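-- pv_equiv track=rewrite | github.com/aepaysinger/code-challenges | code_challenges/code_wars/extra.py | coffee_wait
-- ===== SOURCE A (Python) =====
-- def coffee_wait(orders):
--     if orders == []:
--         return 0
--     cleaning_time = 0
--
--     for i in range(1,len(orders)):
--         cleaning_time = (2 * i) + cleaning_time
--     time = 0
--     orders.sort()
--     for i in range(len(orders)+1):
--         time += sum(orders[:i])
--     return time + cleaning_time
-- ===== SOURCE B (Python) =====
-- def coffee_wait(orders):
--     # One pass over the sorted list with positional weights, plus the
--     # closed form n*(n-1) for the cleaning time.
--     # Note: unlike A, this does not sort `orders` in place.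
--     if not orders:
--         return 0
--     n = len(orders)
--     total = n * (n - 1)
--     for j, v in enumerate(sorted(orders)):
--         total += v * (n - j)
--     return total
-- ===== Notes on version B (the rewrite author's own statement) =====
-- stated objective: faster
-- what changed: Replaced the O(n^2) loop that re-sums every prefix (and the loop accumulating 2*i) by a single weighted pass over the sorted list plus the closed form n*(n-1) for the cleaning time.
import Mathlib
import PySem

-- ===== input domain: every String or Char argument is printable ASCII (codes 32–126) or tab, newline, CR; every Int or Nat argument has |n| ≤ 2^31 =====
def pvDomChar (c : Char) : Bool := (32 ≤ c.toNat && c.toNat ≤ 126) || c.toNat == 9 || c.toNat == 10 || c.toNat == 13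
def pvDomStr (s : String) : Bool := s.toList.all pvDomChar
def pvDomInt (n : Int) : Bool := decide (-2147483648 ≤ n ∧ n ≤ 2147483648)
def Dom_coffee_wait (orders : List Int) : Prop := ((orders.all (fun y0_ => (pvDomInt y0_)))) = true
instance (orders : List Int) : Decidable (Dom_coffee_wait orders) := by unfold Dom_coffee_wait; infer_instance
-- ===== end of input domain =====

-- B replaces A's quadratic prefix re-summing by one weighted pass over the sorted
-- list plus the closed form n*(n-1) for the cleaning time (return value only:
-- A sorts `orders` in place, B does not mutate it).

-- ===== PORT A =====
def coffee_wait (orders : List Int) : Int :=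
  if orders = [] then 0
  else
    let cleaning_time : Int :=
      (PySem.List.pyRange 1 (orders.length : Int) 1).foldl (fun acc i => 2 * i + acc) 0
    let s : List Int := PySem.List.sorted orders (fun x => x) false
    let time : Int :=
      (PySem.List.pyRange 0 ((s.length : Int) + 1) 1).foldl
        (fun acc i => acc + (PySem.List.slice s none (some i)).sum) 0
    time + cleaning_time

-- ===== PORT B =====
def coffee_wait_alt (orders : List Int) : Int :=
  if orders = [] then 0
  else
    let n : Int := (orders.length : Int)
    (PySem.List.enumerate (PySem.List.sorted orders (fun x => x) false) 0).foldl
      (fun acc jv => acc + jv.2 * (n - jv.1)) (n * (n - 1))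

-- ===== PRECONDITION & SPEC =====
def Spec_coffee_wait (orders : List Int) (out : Int) : Prop := out = coffee_wait_alt orders
instance (orders : List Int) (out : Int) : Decidable (Spec_coffee_wait orders out) := by unfold Spec_coffee_wait; infer_instance

-- ===== CLAIM (what is proved, stated in full; the proofs are below) =====
def Claim_equal_coffee_wait : Prop := ∀ (orders : List Int), Dom_coffee_wait orders → Spec_coffee_wait orders (coffee_wait orders)

-- ===== LEMMAS AND PROOFS =====

-- A's cleaning loop is the closed form n*(n-1)
theorem cleaning_closed (n : Nat) :
    (PySem.List.pyRange 1 (n : Int) 1).foldl (fun acc i => 2 * i + acc) 0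
      = (n : Int) * ((n : Int) - 1) := by
  induction n with
  | zero => simp [PySem.List.pyRange_one_eq_nil]
  | succ m ih =>
    rcases Nat.eq_zero_or_pos m with hm | hm
    · subst hm; simp [PySem.List.pyRange_one_eq_nil]
    · have h1 : (1 : Int) ≤ (m : Int) := by exact_mod_cast hm
      rw [show ((m + 1 : Nat) : Int) = (m : Int) + 1 by push_cast; ring,
          PySem.List.pyRange_one_succ_right h1, List.foldl_append, ih]
      simp; ring

-- shifting the start of enumerate shifts the weight
theorem enum_shift (t : List Int) (c m : Int) :
    ((PySem.List.enumerate t c).map (fun jv => jv.2 * (m - jv.1))).sum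
      = ((PySem.List.enumerate t 0).map (fun jv => jv.2 * ((m - c) - jv.1))).sum := by
  induction t generalizing c m with
  | nil => simp [PySem.List.enumerate]
  | cons x t ih =>
    rw [PySem.List.enumerate_cons, PySem.List.enumerate_cons]
    simp only [List.map_cons, List.sum_cons, zero_add]
    rw [ih (c + 1) m, ih 1 (m - c)]
    have hfun : (fun jv : Int × Int => jv.2 * (m - (c + 1) - jv.1))
        = (fun jv : Int × Int => jv.2 * (m - c - 1 - jv.1)) := by funext jv; ring
    rw [hfun]
    ring_nf

-- the sum of all prefix sums equals the weighted sum over the enumerated list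
theorem prefix_sum_eq_weighted (s : List Int) :
    ((List.range (s.length + 1)).map (fun k => (s.take k).sum)).sum
      = ((PySem.List.enumerate s 0).map
          (fun jv => jv.2 * ((s.length : Int) - jv.1))).sum := by
  induction s with
  | nil => simp [PySem.List.enumerate]
  | cons a t ih =>
    rw [List.length_cons, List.range_succ_eq_map]
    simp only [List.map_cons, List.sum_cons, List.take_zero, List.sum_nil,
      List.map_map, PySem.List.enumerate_cons, zero_add]
    have hL : ((List.range (t.length + 1)).map
        ((fun k => ((a :: t).take k).sum) ∘ Nat.succ)).sum
        = ((List.range (t.length + 1)).map (fun _ => a)).sum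
          + ((List.range (t.length + 1)).map (fun k => (t.take k).sum)).sum := by
      rw [← List.sum_map_add]
      rfl
    rw [hL, enum_shift t 1 ((t.length + 1 : Nat) : Int)]
    have hm1 : ((t.length + 1 : Nat) : Int) - 1 = (t.length : Int) := by push_cast; ring
    simp only [hm1]
    rw [← ih]
    simp
    ring

-- a foldl accumulating `acc + g x` is the sum of the mapped list
theorem foldl_add_eq_sum {α : Type} (xs : List α) (g : α → Int) (init : Int) :
    xs.foldl (fun acc x => acc + g x) init = init + (xs.map g).sum := by
  induction xs generalizing init with
  | nil => simp
  | cons x t ih => simp [List.foldl_cons, ih]; ring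

-- ===== VERDICT (by name: the statement is the Claim_ definition above) =====
theorem coffee_wait_spec : Claim_equal_coffee_wait := by
  intro orders _
  unfold Spec_coffee_wait coffee_wait coffee_wait_alt
  by_cases h : orders = []
  · simp [h]
  · simp only [if_neg h]
    set s := PySem.List.sorted orders (fun x => x) false with hs
    have hlen : s.length = orders.length := PySem.List.length_sorted ..
    -- A's time loop as a sum of prefix sums
    have htime : (PySem.List.pyRange 0 ((s.length : Int) + 1) 1).foldl
        (fun acc i => acc + (PySem.List.slice s none (some i)).sum) 0
        = ((List.range (s.length + 1)).map (fun k => (s.take k).sum)).sum := by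
      rw [show ((s.length : Int) + 1) = ((s.length + 1 : Nat) : Int) by push_cast; ring,
          PySem.List.pyRange_zero_nat]
      rw [foldl_add_eq_sum, List.map_map]
      simp only [Function.comp_def, PySem.List.slice_to_natCast, zero_add]
    rw [htime, foldl_add_eq_sum, prefix_sum_eq_weighted, hlen,
        cleaning_closed orders.length]
    ring
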